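-- pv_equiv track=rewrite | github.com/davidpestana/react-typescript | material/react-pdf-indice/formatear_md.py | merge_consecutive_code_blocks
-- ===== SOURCE A (Python) =====
-- def merge_consecutive_code_blocks(text: str) -> str:
--     """Une bloques ```tsx (o ```js, etc.) consecutivos separados solo por líneas en blanco."""
--     lines = text.split("\n")
--     out = []
--     i = 0
--     while i < len(lines):
--         line = lines[i]
--         stripped = line.strip()
--         # Apertura de bloque (```tsx, ```js, etc.)
--         if stripped.startswith("```") and stripped != "```":
--             fence = stripped
--             out.append(line)
--             i += 1
--             all_content = []
--             while True:
--                 while i < len(lines) and lines[i].strip() != "```":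
--                     all_content.append(lines[i])
--                     i += 1
--                 if i >= len(lines):
--                     break
--                 i += 1  # consumir ```
--                 while i < len(lines) and not lines[i].strip():
--                     i += 1
--                 if i < len(lines) and lines[i].strip() == fence:
--                     all_content.append("")
--                     i += 1  # consumir siguiente ```tsx
--                 else:
--                     break
--             out.extend(all_content)
--             out.append("```")
--         else:
--             out.append(line)
--             i += 1
--     return "\n".join(out)
-- ===== SOURCE B (Python) =====
-- def merge_consecutive_code_blocks(text: str) -> str:
--     """Une bloques ```tsx (o ```js, etc.) consecutivos separados solo por líneas en blanco."""
--     lines = text.split("\n")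
--     n = len(lines)
--     # Pass 1: tokenize into plain lines and code-block tokens.
--     # A token is (None, line) for a plain line, or (fence, open_line, content, closed).
--     toks = []
--     i = 0
--     while i < n:
--         s = lines[i].strip()
--         if s.startswith("```") and s != "```":
--             j = i + 1
--             content = []
--             while j < n and lines[j].strip() != "```":
--                 content.append(lines[j])
--                 j += 1
--             closed = j < n
--             toks.append((s, lines[i], content, closed))
--             i = j + 1 if closed else j
--         else:
--             toks.append((None, lines[i]))
--             i += 1
--     # Pass 2: emit, merging same-fence blocks separated only by blank plain lines.
--     out = []
--     m = len(toks)
--     k = 0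
--     while k < m:
--         t = toks[k]
--         if t[0] is None:
--             out.append(t[1])
--             k += 1
--         else:
--             fence, open_line, acc, closed = t[0], t[1], list(t[2]), t[3]
--             k += 1
--             while closed:
--                 j = k
--                 while j < m and toks[j][0] is None and not toks[j][1].strip():
--                     j += 1
--                 if j < m and toks[j][0] == fence:
--                     acc.append("")
--                     acc.extend(toks[j][2])
--                     closed = toks[j][3]
--                     k = j + 1
--                 else:
--                     k = j
--                     break
--             out.append(open_line)
--             out.extend(acc)
--             out.append("```")
--     return "\n".join(out)
-- ===== Notes on version B (the rewrite author's own statement) =====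
-- stated objective: alternative
-- what changed: A's single index-walking while-loop with a nested merge loop is replaced by a two-pass decomposition: first tokenize the lines into plain-line and code-block segments, then a separate emit pass that merges consecutive same-fence block tokens separated only by blank plain tokens.
import Mathlib
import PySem

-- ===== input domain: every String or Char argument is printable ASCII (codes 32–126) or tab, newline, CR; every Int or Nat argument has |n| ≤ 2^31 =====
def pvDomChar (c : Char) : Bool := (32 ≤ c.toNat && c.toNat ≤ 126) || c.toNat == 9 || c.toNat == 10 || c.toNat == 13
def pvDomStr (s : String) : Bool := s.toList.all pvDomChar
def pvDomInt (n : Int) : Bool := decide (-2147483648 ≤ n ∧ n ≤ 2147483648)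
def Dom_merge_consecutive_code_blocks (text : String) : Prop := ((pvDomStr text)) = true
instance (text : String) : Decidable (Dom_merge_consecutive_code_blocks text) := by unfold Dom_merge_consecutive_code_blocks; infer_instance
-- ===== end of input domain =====

-- B rewrites A's single index-walking loop as two passes (tokenize into plain/code-block
-- segments, then a merge-and-emit pass over the tokens); objective: alternative decomposition.

-- ===== PORT A =====
-- helpers shared by both ports: Python's line.strip() / startswith tests
def pvOpenTest (l : String) : Bool :=
  PySem.Str.startswith (PySem.Str.strip l) "```" && (PySem.Str.strip l != "```")
def pvNotClose (l : String) : Bool := PySem.Str.strip l != "```"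
def pvBlank (l : String) : Bool := PySem.Str.strip l == ""

-- A's inner `while True` loop, split at its two re-entry points:
-- pvCollectA starts right after an opening fence (scans content up to a bare ```);
-- pvAfterClose starts right after a consumed bare ``` (skips blanks, checks the fence).
mutual
def pvCollectA (fence : String) (ls : List String) : List String × List String :=
  let body := ls.takeWhile pvNotClose
  match _h : ls.dropWhile pvNotClose with
  | [] => (body, [])
  | _ :: rest2 =>
    let p := pvAfterClose fence rest2
    (body ++ p.1, p.2)
termination_by ls.length
decreasing_by
  have := List.length_dropWhile_le pvNotClose ls
  rw [_h] at this; simp at this; omega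

def pvAfterClose (fence : String) (ls : List String) : List String × List String :=
  match _h : ls.dropWhile pvBlank with
  | [] => ([], [])
  | f :: rest4 =>
    if PySem.Str.strip f == fence then
      let p := pvCollectA fence rest4
      ("" :: p.1, p.2)
    else ([], f :: rest4)
termination_by ls.length
decreasing_by
  have := List.length_dropWhile_le pvBlank ls
  rw [_h] at this; simp at this; omega
end

-- termination facts for the outer loop (the leftover is never longer than the input)
mutual
theorem pvCollectA_snd_le (fence : String) (ls : List String) :
    (pvCollectA fence ls).2.length ≤ ls.length := by
  rw [pvCollectA]
  split
  · simp
  · rename_i x rest2 h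
    have h1 := List.length_dropWhile_le pvNotClose ls
    rw [h] at h1; simp at h1
    have := pvAfterClose_snd_le fence rest2
    simpa using le_trans this (by omega)
termination_by ls.length
decreasing_by
  simp_all

theorem pvAfterClose_snd_le (fence : String) (ls : List String) :
    (pvAfterClose fence ls).2.length ≤ ls.length := by
  rw [pvAfterClose]
  split
  · simp
  · rename_i f rest4 h
    have h1 := List.length_dropWhile_le pvBlank ls
    rw [h] at h1; simp at h1
    split
    · have := pvCollectA_snd_le fence rest4
      simpa using le_trans this (by omega)
    · simpa using h1
termination_by ls.length
decreasing_by
  simp_all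
end

-- A's outer `while i < len(lines)` loop
def pvProcA : List String → List String
  | [] => []
  | l :: rest =>
    if pvOpenTest l then
      let p := pvCollectA (PySem.Str.strip l) rest
      l :: (p.1 ++ ["```"]) ++ pvProcA p.2
    else l :: pvProcA rest
termination_by ls => ls.length
decreasing_by
  · have := pvCollectA_snd_le (PySem.Str.strip l) rest
    simp only [List.length_cons]; omega
  · simp only [List.length_cons]; omega

def merge_consecutive_code_blocks (text : String) : String :=
  let lines := (PySem.Str.split? text "\n").getD []
  PySem.Str.join "\n" (pvProcA lines)

-- ===== PORT B =====
-- a token is a plain line or a code block (fence, opening line, content, closed?)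
inductive PvTok
  | plain : String → PvTok
  | block : String → String → List String → Bool → PvTok
deriving DecidableEq, Repr

-- pass 1 of Source B: tokenize
def pvTokenize : List String → List PvTok
  | [] => []
  | l :: rest =>
    if pvOpenTest l then
      let content := rest.takeWhile pvNotClose
      match _h : rest.dropWhile pvNotClose with
      | [] => [PvTok.block (PySem.Str.strip l) l content false]
      | _ :: rest2 => PvTok.block (PySem.Str.strip l) l content true :: pvTokenize rest2
    else PvTok.plain l :: pvTokenize rest
termination_by ls => ls.length
decreasing_by
  · have := List.length_dropWhile_le pvNotClose rest
    rw [_h] at this; simp at this; simp only [List.length_cons]; omega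
  · simp only [List.length_cons]; omega

def pvIsBlankPlain : PvTok → Bool
  | PvTok.plain l => pvBlank l
  | _ => false

-- pass 2, inner merge loop of Source B: absorb same-fence follow-up blocks
def pvAbsorb (fence : String) (closed : Bool) (ts : List PvTok) : List String × List PvTok :=
  if closed then
    match _h : ts.dropWhile pvIsBlankPlain with
    | PvTok.block f ol c cl :: ts2 =>
      if f == fence then
        let p := pvAbsorb fence cl ts2
        (("" :: c) ++ p.1, p.2)
      else ([], PvTok.block f ol c cl :: ts2)
    | ts1 => ([], ts1)
  else ([], ts)
termination_by ts.length
decreasing_by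
  have := List.length_dropWhile_le pvIsBlankPlain ts
  rw [_h] at this; simp at this; omega

theorem pvAbsorb_snd_le (fence : String) (closed : Bool) (ts : List PvTok) :
    (pvAbsorb fence closed ts).2.length ≤ ts.length := by
  rw [pvAbsorb]
  split
  · split
    · rename_i f ol c cl ts2 h
      have h1 := List.length_dropWhile_le pvIsBlankPlain ts
      rw [h] at h1; simp at h1
      split
      · have := pvAbsorb_snd_le fence cl ts2
        simpa using le_trans this (by omega)
      · simpa using h1
    · have h1 := List.length_dropWhile_le pvIsBlankPlain ts
      simpa using h1
  · simp
termination_by ts.length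
decreasing_by
  simp_all

-- pass 2 of Source B: emit
def pvEmit : List PvTok → List String
  | [] => []
  | PvTok.plain l :: ts => l :: pvEmit ts
  | PvTok.block fence ol content closed :: ts =>
    let p := pvAbsorb fence closed ts
    ol :: (content ++ p.1 ++ ["```"]) ++ pvEmit p.2
termination_by ts => ts.length
decreasing_by
  · simp only [List.length_cons]; omega
  · have := pvAbsorb_snd_le fence closed ts
    simp only [List.length_cons]; omega

def merge_consecutive_code_blocks_alt (text : String) : String :=
  let lines := (PySem.Str.split? text "\n").getD []
  PySem.Str.join "\n" (pvEmit (pvTokenize lines))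

-- ===== PRECONDITION & SPEC =====
def Spec_merge_consecutive_code_blocks (text : String) (out : String) : Prop := out = merge_consecutive_code_blocks_alt text
instance (text : String) (out : String) : Decidable (Spec_merge_consecutive_code_blocks text out) := by unfold Spec_merge_consecutive_code_blocks; infer_instance

-- ===== CLAIM (what is proved, stated in full; the proofs are below) =====
def Claim_equal_merge_consecutive_code_blocks : Prop := ∀ (text : String), Dom_merge_consecutive_code_blocks text → Spec_merge_consecutive_code_blocks text (merge_consecutive_code_blocks text)

-- ===== LEMMAS AND PROOFS =====
theorem dropWhile_head_false {α : Type} (p : α → Bool) (ls : List α) (x : α) (rest : List α)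
    (h : ls.dropWhile p = x :: rest) : p x = false := by
  induction ls with
  | nil => simp [List.dropWhile] at h
  | cons a as ih =>
    rw [List.dropWhile_cons] at h
    split at h
    · exact ih h
    · rename_i hp
      cases h; simpa using hp

theorem blank_not_open (l : String) (hb : pvBlank l = true) : pvOpenTest l = false := by
  have : PySem.Str.strip l = "" := by simpa [pvBlank] using hb
  simp [pvOpenTest, this]
  decide

-- clean one-step equations for the ports (resolving the dependent matches)
theorem collectA_nil (fence : String) (ls : List String) (h : ls.dropWhile pvNotClose = []) :
    pvCollectA fence ls = (ls.takeWhile pvNotClose, []) := by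
  rw [pvCollectA]; split <;> simp_all

theorem collectA_cons (fence : String) (ls : List String) (x : String) (rest2 : List String)
    (h : ls.dropWhile pvNotClose = x :: rest2) :
    pvCollectA fence ls =
      (ls.takeWhile pvNotClose ++ (pvAfterClose fence rest2).1, (pvAfterClose fence rest2).2) := by
  rw [pvCollectA]; split <;> simp_all

theorem afterClose_nil (fence : String) (ls : List String) (h : ls.dropWhile pvBlank = []) :
    pvAfterClose fence ls = ([], []) := by
  rw [pvAfterClose]; split <;> simp_all

theorem afterClose_cons (fence : String) (ls : List String) (f : String) (rest4 : List String)
    (h : ls.dropWhile pvBlank = f :: rest4) :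
    pvAfterClose fence ls =
      if PySem.Str.strip f == fence then
        ("" :: (pvCollectA fence rest4).1, (pvCollectA fence rest4).2)
      else ([], f :: rest4) := by
  rw [pvAfterClose]; split <;> simp_all

theorem tokenize_open_nil (l : String) (rest : List String) (ho : pvOpenTest l = true)
    (h : rest.dropWhile pvNotClose = []) :
    pvTokenize (l :: rest) = [PvTok.block (PySem.Str.strip l) l (rest.takeWhile pvNotClose) false] := by
  rw [pvTokenize]; simp only [ho, if_true]; split <;> simp_all

theorem tokenize_open_cons (l : String) (rest : List String) (x : String) (rest2 : List String)
    (ho : pvOpenTest l = true) (h : rest.dropWhile pvNotClose = x :: rest2) :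
    pvTokenize (l :: rest) =
      PvTok.block (PySem.Str.strip l) l (rest.takeWhile pvNotClose) true :: pvTokenize rest2 := by
  rw [pvTokenize]; simp only [ho, if_true]; split <;> simp_all

theorem tokenize_plain (l : String) (rest : List String) (ho : pvOpenTest l = false) :
    pvTokenize (l :: rest) = PvTok.plain l :: pvTokenize rest := by
  rw [pvTokenize]; simp [ho]

theorem absorb_false (fence : String) (ts : List PvTok) : pvAbsorb fence false ts = ([], ts) := by
  rw [pvAbsorb]; simp

theorem absorb_dropnil (fence : String) (ts : List PvTok) (h : ts.dropWhile pvIsBlankPlain = []) :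
    pvAbsorb fence true ts = ([], []) := by
  rw [pvAbsorb]; simp only [if_true]; split <;> simp_all

theorem absorb_plain (fence : String) (ts : List PvTok) (l : String) (ts2 : List PvTok)
    (h : ts.dropWhile pvIsBlankPlain = PvTok.plain l :: ts2) :
    pvAbsorb fence true ts = ([], PvTok.plain l :: ts2) := by
  rw [pvAbsorb]; simp only [if_true]; split <;> simp_all

theorem absorb_block (fence : String) (ts : List PvTok) (f ol : String) (c : List String)
    (cl : Bool) (ts2 : List PvTok) (h : ts.dropWhile pvIsBlankPlain = PvTok.block f ol c cl :: ts2) :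
    pvAbsorb fence true ts =
      if f == fence then (("" :: c) ++ (pvAbsorb fence cl ts2).1, (pvAbsorb fence cl ts2).2)
      else ([], PvTok.block f ol c cl :: ts2) := by
  rw [pvAbsorb]; simp only [if_true]; split
  · rename_i f' ol' c' cl' ts2' heq
    rw [h] at heq
    simp only [List.cons.injEq, PvTok.block.injEq] at heq
    obtain ⟨⟨rfl, rfl, rfl, rfl⟩, rfl⟩ := heq
    rfl
  · rename_i hno
    exact absurd h (hno f ol c cl ts2)

theorem tokenize_blank_prefix (ls : List String) :
    pvTokenize ls = (ls.takeWhile pvBlank).map PvTok.plain ++ pvTokenize (ls.dropWhile pvBlank) := by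
  induction ls with
  | nil => simp
  | cons l rest ih =>
    by_cases hb : pvBlank l = true
    · rw [List.takeWhile_cons_of_pos hb, List.dropWhile_cons_of_pos hb]
      rw [tokenize_plain l rest (blank_not_open l hb)]
      simp [ih]
    · rw [List.takeWhile_cons_of_neg (by simpa using hb), List.dropWhile_cons_of_neg (by simpa using hb)]
      simp

theorem dropBlankPlain_tokenize (ls : List String)
    (hhead : ∀ x rest, ls = x :: rest → pvBlank x = false) :
    (pvTokenize ls).dropWhile pvIsBlankPlain = pvTokenize ls := by
  cases ls with
  | nil => simp [pvTokenize]
  | cons f rest =>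
    have hf := hhead f rest rfl
    by_cases ho : pvOpenTest f = true
    · rcases hd : rest.dropWhile pvNotClose with _ | ⟨x, rest2⟩
      · rw [tokenize_open_nil f rest ho hd]; simp [List.dropWhile, pvIsBlankPlain]
      · rw [tokenize_open_cons f rest x rest2 ho hd]; simp [List.dropWhile, pvIsBlankPlain]
    · rw [tokenize_plain f rest (by simpa using ho)]
      simp [List.dropWhile, pvIsBlankPlain, hf]

-- blank plain tokens made from a blank-line prefix are dropped entirely
theorem drop_tokenize (ls : List String) :
    (pvTokenize ls).dropWhile pvIsBlankPlain = pvTokenize (ls.dropWhile pvBlank) := by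
  rw [tokenize_blank_prefix ls, List.dropWhile_append]
  have h1 : ((ls.takeWhile pvBlank).map PvTok.plain).dropWhile pvIsBlankPlain = [] := by
    rw [List.dropWhile_eq_nil_iff]
    intro x hx
    simp only [List.mem_map] at hx
    obtain ⟨a, ha, rfl⟩ := hx
    have := List.mem_takeWhile_imp ha
    simpa [pvIsBlankPlain] using this
  rw [h1]
  simp only [List.isEmpty_nil, if_true]
  exact dropBlankPlain_tokenize _ (fun x rest hxr => dropWhile_head_false pvBlank ls x rest hxr)

theorem open_of_strip_eq (f fence : String) (hsw : PySem.Str.startswith fence "```" = true)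
    (hne : fence ≠ "```") (hfe : PySem.Str.strip f = fence) : pvOpenTest f = true := by
  simp only [pvOpenTest, hfe, Bool.and_eq_true, bne_iff_ne, ne_eq]
  exact ⟨hsw, hne⟩

-- the crux: B's absorb pass computes exactly A's after-a-close continuation
theorem absorb_afterClose (n : Nat) : ∀ (fence : String),
    PySem.Str.startswith fence "```" = true → fence ≠ "```" → ∀ (ls : List String), ls.length ≤ n →
    pvAbsorb fence true (pvTokenize ls) = ((pvAfterClose fence ls).1, pvTokenize (pvAfterClose fence ls).2) := by
  induction n using Nat.strong_induction_on with
  | _ n IH =>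
  intro fence hsw hne ls hlen
  rcases hr3 : ls.dropWhile pvBlank with _ | ⟨f, rest4⟩
  · rw [afterClose_nil fence ls hr3,
        absorb_dropnil fence _ (by rw [drop_tokenize, hr3]; simp [pvTokenize])]
    simp [pvTokenize]
  · have hfb : pvBlank f = false := dropWhile_head_false pvBlank ls f rest4 hr3
    have hlen4 : rest4.length < ls.length := by
      have := List.length_dropWhile_le pvBlank ls
      rw [hr3] at this; simp at this; omega
    rw [afterClose_cons fence ls f rest4 hr3]
    by_cases ho : pvOpenTest f = true
    · rcases hd4 : rest4.dropWhile pvNotClose with _ | ⟨x, rest2'⟩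
      · have htok := tokenize_open_nil f rest4 ho hd4
        have hdt : (pvTokenize ls).dropWhile pvIsBlankPlain
            = [PvTok.block (PySem.Str.strip f) f (rest4.takeWhile pvNotClose) false] := by
          rw [drop_tokenize, hr3, htok]
        rw [absorb_block fence _ _ _ _ _ _ hdt]
        by_cases hfe : (PySem.Str.strip f == fence) = true
        · rw [if_pos hfe, if_pos hfe, collectA_nil fence rest4 hd4, absorb_false]
          simp [pvTokenize]
        · have hfe' : ¬ (PySem.Str.strip f == fence) = true := by simp_all
          rw [if_neg hfe', if_neg hfe']
          simp [htok]
      · have hlen2 : rest2'.length < n := by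
          have := List.length_dropWhile_le pvNotClose rest4
          rw [hd4] at this; simp at this; omega
        have htok := tokenize_open_cons f rest4 x rest2' ho hd4
        have hdt : (pvTokenize ls).dropWhile pvIsBlankPlain
            = PvTok.block (PySem.Str.strip f) f (rest4.takeWhile pvNotClose) true :: pvTokenize rest2' := by
          rw [drop_tokenize, hr3, htok]
        rw [absorb_block fence _ _ _ _ _ _ hdt]
        by_cases hfe : (PySem.Str.strip f == fence) = true
        · rw [if_pos hfe, if_pos hfe, collectA_cons fence rest4 x rest2' hd4,
              IH rest2'.length hlen2 fence hsw hne rest2' le_rfl]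
          simp
        · have hfe' : ¬ (PySem.Str.strip f == fence) = true := by simp_all
          rw [if_neg hfe', if_neg hfe']
          simp [htok]
    · have htok := tokenize_plain f rest4 (by simpa using ho)
      have hdt : (pvTokenize ls).dropWhile pvIsBlankPlain = PvTok.plain f :: pvTokenize rest4 := by
        rw [drop_tokenize, hr3, htok]
      rw [absorb_plain fence _ _ _ hdt]
      have hfe : (PySem.Str.strip f == fence) = false := by
        apply beq_eq_false_iff_ne.mpr
        intro hc
        rw [open_of_strip_eq f fence hsw hne hc] at ho
        exact ho rfl
      have hfe' : ¬ (PySem.Str.strip f == fence) = true := by simp_all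
      rw [if_neg hfe']
      simp [htok]

-- main loop correspondence
theorem proc_eq_emit (n : Nat) : ∀ (ls : List String), ls.length ≤ n →
    pvProcA ls = pvEmit (pvTokenize ls) := by
  induction n using Nat.strong_induction_on with
  | _ n IH =>
  intro ls hlen
  rcases ls with _ | ⟨l, rest⟩
  · simp [pvProcA, pvTokenize, pvEmit]
  · simp only [List.length_cons] at hlen
    by_cases ho : pvOpenTest l = true
    · have ho' := ho
      simp only [pvOpenTest, Bool.and_eq_true, bne_iff_ne, ne_eq] at ho'
      obtain ⟨hsw, hne⟩ := ho'
      rw [pvProcA]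
      simp only [ho, if_true]
      rcases hd : rest.dropWhile pvNotClose with _ | ⟨x, rest2⟩
      · rw [tokenize_open_nil l rest ho hd, collectA_nil _ rest hd, pvEmit, absorb_false]
        simp [pvProcA, pvEmit]
      · have hlen2 : rest2.length < n := by
          have := List.length_dropWhile_le pvNotClose rest
          rw [hd] at this; simp at this; omega
        rw [tokenize_open_cons l rest x rest2 ho hd, collectA_cons _ rest x rest2 hd, pvEmit]
        rw [absorb_afterClose rest2.length (PySem.Str.strip l) hsw hne rest2 le_rfl]
        have hrest : (pvAfterClose (PySem.Str.strip l) rest2).2.length < n := by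
          have := pvAfterClose_snd_le (PySem.Str.strip l) rest2
          omega
        rw [← IH _ hrest (pvAfterClose (PySem.Str.strip l) rest2).2 le_rfl]
    · rw [pvProcA, tokenize_plain l rest (by simpa using ho), pvEmit]
      rw [IH rest.length (by omega) rest le_rfl]
      simp [ho]

-- ===== VERDICT (by name: the statement is the Claim_ definition above) =====
theorem merge_consecutive_code_blocks_spec : Claim_equal_merge_consecutive_code_blocks := by
  intro text _
  unfold Spec_merge_consecutive_code_blocks merge_consecutive_code_blocks merge_consecutive_code_blocks_alt
  show PySem.Str.join "\n" (pvProcA ((PySem.Str.split? text "\n").getD []))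
      = PySem.Str.join "\n" (pvEmit (pvTokenize ((PySem.Str.split? text "\n").getD [])))
  rw [proc_eq_emit ((PySem.Str.split? text "\n").getD []).length _ le_rfl]
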